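-- pv_equiv track=rewrite | github.com/Cybok06/nagonu_updated | index.py | _name_rank
-- ===== SOURCE A (Python) =====
-- from typing import Any, Dict, List, Optional, Tuple
--
-- def _norm(s: str) -> str:
--     return (s or "").strip().lower()
--
-- PREFERRED_ORDER: List[str] = ["MTN", "AT - iShare", "AT - BigTime", "AFA TALKTIME"]
--
-- def _name_rank(name: str) -> Optional[int]:
--     n = _norm(name)
--     for i, want in enumerate(PREFERRED_ORDER):
--         if _norm(want) == n:
--             return i
--     n2 = " ".join(n.split())
--     for i, want in enumerate(PREFERRED_ORDER):
--         if " ".join(_norm(want).split()) == n2: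
--             return i
--     return None
-- ===== SOURCE B (Python) =====
-- from typing import Optional
--
-- def _norm(s: str) -> str:
--     return (s or "").strip().lower()
--
-- def _name_rank(name: str) -> Optional[int]:
--     # Hardcoded decision tree on the collapsed normalized name: dispatch on the
--     # first character, then confirm the full literal. No preference list, no scan.
--     n2 = " ".join(_norm(name).split())
--     if not n2:
--         return None
--     c = n2[0]
--     if c == "m":
--         return 0 if n2 == "mtn" else None
--     if c == "a":
--         if n2 == "at - ishare":
--             return 1
--         if n2 == "at - bigtime":
--             return 2
--         if n2 == "afa talktime":
--             return 3
--     return None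
-- ===== Notes on version B (the rewrite author's own statement) =====
-- stated objective: alternative
-- what changed: Replaces A's two data-driven linear scans over PREFERRED_ORDER (exact-norm pass, then collapsed-norm pass) by a hardcoded decision tree: collapse the normalized name once, dispatch on its first character, and confirm the full literal; the list and both loops disappear.
import Mathlib
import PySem

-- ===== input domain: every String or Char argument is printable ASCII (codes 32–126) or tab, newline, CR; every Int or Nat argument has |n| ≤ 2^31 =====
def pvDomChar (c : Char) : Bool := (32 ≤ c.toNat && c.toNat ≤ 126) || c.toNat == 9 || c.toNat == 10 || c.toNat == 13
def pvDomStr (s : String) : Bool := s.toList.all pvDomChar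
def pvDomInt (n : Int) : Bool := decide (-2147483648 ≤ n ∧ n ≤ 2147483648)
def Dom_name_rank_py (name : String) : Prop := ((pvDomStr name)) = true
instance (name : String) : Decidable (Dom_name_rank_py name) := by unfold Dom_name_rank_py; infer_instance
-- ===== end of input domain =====

-- B replaces A's two data-driven scans over PREFERRED_ORDER by a hardcoded
-- decision tree on the collapsed normalized name (objective: alternative).

-- ===== PORT A =====
-- _norm(s) = (s or "").strip().lower()  ('s or ""' is identity on strip: "" strips to "")
def pvNorm (s : String) : String := PySem.Str.lower (PySem.Str.strip s)

def pvPreferredOrder : List String := ["MTN", "AT - iShare", "AT - BigTime", "AFA TALKTIME"]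

-- first for-loop: return i on first _norm(want) == n
def pvLoop1 (n : String) : List (Int × String) → Option Int
  | [] => none
  | (i, want) :: rest => if pvNorm want = n then some i else pvLoop1 n rest

-- second for-loop: return i on first " ".join(_norm(want).split()) == n2
def pvLoop2 (n2 : String) : List (Int × String) → Option Int
  | [] => none
  | (i, want) :: rest =>
      if PySem.Str.join " " (PySem.Str.split₀ (pvNorm want)) = n2 then some i else pvLoop2 n2 rest

def name_rank_py (name : String) : Option Int :=
  let n := pvNorm name
  match pvLoop1 n (PySem.List.enumerate pvPreferredOrder) with
  | some i => some i
  | none =>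
      let n2 := PySem.Str.join " " (PySem.Str.split₀ n)
      pvLoop2 n2 (PySem.List.enumerate pvPreferredOrder)

-- ===== PORT B =====  (Source B: collapse once, dispatch on the first character,
-- confirm the full literal; no list, no loop)
def pvCollapse (s : String) : String := PySem.Str.join " " (PySem.Str.split₀ s)

-- the decision tree on the collapsed name (the body of Source B after n2 is bound)
def pvTree (n2 : String) : Option Int :=
  if n2 = "" then none
  else
    match PySem.Str.pyGet? n2 0 with   -- n2[0]; guarded nonempty, never IndexError
    | none => none
    | some c =>
        if c = 'm' then (if n2 = "mtn" then some 0 else none)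
        else if c = 'a' then
          if n2 = "at - ishare" then some 1
          else if n2 = "at - bigtime" then some 2
          else if n2 = "afa talktime" then some 3
          else none
        else none

def name_rank_py_alt (name : String) : Option Int :=
  pvTree (pvCollapse (pvNorm name))

-- ===== PRECONDITION & SPEC =====
def Spec_name_rank_py (name : String) (out : Option Int) : Prop := out = name_rank_py_alt name
instance (name : String) (out : Option Int) : Decidable (Spec_name_rank_py name out) := by unfold Spec_name_rank_py; infer_instance

-- ===== CLAIM (what is proved, stated in full; the proofs are below) =====
def Claim_equal_name_rank_py : Prop := ∀ (name : String), Dom_name_rank_py name → Spec_name_rank_py name (name_rank_py name)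

-- ===== LEMMAS AND PROOFS =====

-- first-match if-chain over the four collapsed entries (proof-only helper)
def pvChain (n2 : String) : Option Int :=
  if "mtn" = n2 then some 0
  else if "at - ishare" = n2 then some 1
  else if "at - bigtime" = n2 then some 2
  else if "afa talktime" = n2 then some 3
  else none

-- the enumerate call over the module constant, evaluated
theorem enumA : PySem.List.enumerate pvPreferredOrder =
    [((0:Int),"MTN"),(1,"AT - iShare"),(2,"AT - BigTime"),(3,"AFA TALKTIME")] := by decide

-- A's first loop over the evaluated list, with each _norm(want) evaluated
theorem loop1_eq (n : String) :
    pvLoop1 n [((0:Int),"MTN"),(1,"AT - iShare"),(2,"AT - BigTime"),(3,"AFA TALKTIME")] =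
      pvChain n := by
  have e0 : pvNorm "MTN" = "mtn" := by decide
  have e1 : pvNorm "AT - iShare" = "at - ishare" := by decide
  have e2 : pvNorm "AT - BigTime" = "at - bigtime" := by decide
  have e3 : pvNorm "AFA TALKTIME" = "afa talktime" := by decide
  simp only [pvLoop1, pvChain, e0, e1, e2, e3]

-- A's second loop likewise, with each " ".join(_norm(want).split()) evaluated
theorem loop2_eq (n2 : String) :
    pvLoop2 n2 [((0:Int),"MTN"),(1,"AT - iShare"),(2,"AT - BigTime"),(3,"AFA TALKTIME")] =
      pvChain n2 := by
  have c0 : PySem.Str.join " " (PySem.Str.split₀ (pvNorm "MTN")) = "mtn" := by decide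
  have c1 : PySem.Str.join " " (PySem.Str.split₀ (pvNorm "AT - iShare")) = "at - ishare" := by decide
  have c2 : PySem.Str.join " " (PySem.Str.split₀ (pvNorm "AT - BigTime")) = "at - bigtime" := by decide
  have c3 : PySem.Str.join " " (PySem.Str.split₀ (pvNorm "AFA TALKTIME")) = "afa talktime" := by decide
  simp only [pvLoop2, pvChain, c0, c1, c2, c3]

-- A equals the first-match chain applied to the collapsed normalized name.
theorem name_rank_py_eq (name : String) :
    name_rank_py name = pvChain (pvCollapse (pvNorm name)) := by
  simp only [name_rank_py, enumA, loop1_eq, loop2_eq]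
  cases h : pvChain (pvNorm name) with
  | none => rfl
  | some i =>
    unfold pvChain at h
    split_ifs at h with h0 h1 h2 h3
    · rw [← h0]; injection h with h; subst h; decide
    · rw [← h1]; injection h with h; subst h; decide
    · rw [← h2]; injection h with h; subst h; decide
    · rw [← h3]; injection h with h; subst h; decide

-- B's decision tree equals the same chain, for every string it is applied to.
theorem tree_eq (n2 : String) : pvTree n2 = pvChain n2 := by
  unfold pvTree
  by_cases h0 : n2 = "mtn"
  · subst h0; decide
  by_cases h1 : n2 = "at - ishare"
  · subst h1; decide
  by_cases h2 : n2 = "at - bigtime"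
  · subst h2; decide
  by_cases h3 : n2 = "afa talktime"
  · subst h3; decide
  have hc : pvChain n2 = none := by
    unfold pvChain
    rw [if_neg (fun h => h0 h.symm), if_neg (fun h => h1 h.symm),
        if_neg (fun h => h2 h.symm), if_neg (fun h => h3 h.symm)]
  rw [hc]
  by_cases he : n2 = ""
  · rw [if_pos he]
  · rw [if_neg he]
    cases PySem.Str.pyGet? n2 0 with
    | none => rfl
    | some c =>
      rw [if_neg h0, if_neg h1, if_neg h2, if_neg h3]
      show (if c = 'm' then none else if c = 'a' then none else none : Option Int) = none
      split_ifs <;> rfl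

theorem alt_eq (name : String) :
    name_rank_py_alt name = pvChain (pvCollapse (pvNorm name)) := tree_eq _

-- ===== VERDICT (by name: the statement is the Claim_ definition above) =====
theorem name_rank_py_spec : Claim_equal_name_rank_py := by
  intro name _
  unfold Spec_name_rank_py
  rw [name_rank_py_eq, alt_eq]
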